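-- pv_equiv track=rewrite | github.com/itzliquauhtli/personalPythonDrabbles | a02_itzliquauhtli.py | thueMorse
-- ===== SOURCE A (Python) =====
-- def thueMorse( n ):
--     n = 2 * n + 1
--     out = [ True ]
--     for i in range( n ):
--         step = []
--         for j in out:
--             step.append( not j )
--         for j in step:
--             out.append( j )
--     return out
-- ===== SOURCE B (Python) =====
-- def thueMorse(n):
--     k = max(0, 2 * n + 1)
--     return [bin(i).count('1') % 2 == 0 for i in range(2 ** k)]
-- ===== Notes on version B (the rewrite author's own statement) =====
-- stated objective: alternative
-- what changed: Replaces A's repeated doubling-by-negation of a growing list with a direct per-index closed form: element i of the output is True iff i has an even popcount, over a range whose length is computed up front.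
import Mathlib
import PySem

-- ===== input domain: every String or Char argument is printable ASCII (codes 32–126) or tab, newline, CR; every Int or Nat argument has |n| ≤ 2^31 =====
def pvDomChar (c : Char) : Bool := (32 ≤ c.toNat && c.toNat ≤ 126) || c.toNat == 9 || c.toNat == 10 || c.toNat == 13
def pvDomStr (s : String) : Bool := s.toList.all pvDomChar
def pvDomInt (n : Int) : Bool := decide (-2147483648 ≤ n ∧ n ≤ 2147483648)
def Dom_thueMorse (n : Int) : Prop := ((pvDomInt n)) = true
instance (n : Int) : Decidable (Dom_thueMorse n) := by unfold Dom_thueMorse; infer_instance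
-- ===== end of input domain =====

-- B computes each element directly from the parity of the index's popcount instead of
-- A's repeated doubling-by-negation; same values, a different algorithm.
-- ===== PORT A =====
def thueMorse (n : Int) : List Bool :=
  let n := 2 * n + 1
  (PySem.List.pyRange 0 n 1).foldl (fun out _ =>
    let step := out.foldl (fun s j => s ++ [!j]) []
    step.foldl (fun o j => o ++ [j]) out) [true]

-- ===== PORT B =====
-- hand port of Python's bin(i).count('1'): exact popcount of a nonnegative machine int
def popcnt (i : Nat) : Nat :=
  if i = 0 then 0 else popcnt (i / 2) + i % 2

def thueMorse_alt (n : Int) : List Bool :=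
  let k := (max 0 (2 * n + 1)).toNat
  (List.range (2 ^ k)).map (fun i => popcnt i % 2 == 0)

-- ===== PRECONDITION & SPEC =====
def Spec_thueMorse (n : Int) (out : List Bool) : Prop := out = thueMorse_alt n
instance (n : Int) (out : List Bool) : Decidable (Spec_thueMorse n out) := by unfold Spec_thueMorse; infer_instance

-- ===== CLAIM (what is proved, stated in full; the proofs are below) =====
def Claim_equal_thueMorse : Prop := ∀ (n : Int), Dom_thueMorse n → Spec_thueMorse n (thueMorse n)

-- ===== LEMMAS AND PROOFS =====

-- ===== VERDICT (by name: the statement is the Claim_ definition above) =====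
-- inner append loops are maps / appends
theorem foldl_snoc_not (l : List Bool) (acc : List Bool) :
    l.foldl (fun s j => s ++ [!j]) acc = acc ++ l.map (!·) := by
  induction l generalizing acc with
  | nil => simp
  | cons x xs ih => simp [List.foldl_cons, ih]

theorem foldl_snoc_id (l : List Bool) (acc : List Bool) :
    l.foldl (fun o j => o ++ [j]) acc = acc ++ l := by
  induction l generalizing acc with
  | nil => simp
  | cons x xs ih => simp [List.foldl_cons, ih]

-- the doubling step
def g (s : List Bool) : List Bool := s ++ s.map (!·)

theorem foldl_body_eq_iterate (l : List Int) (s : List Bool) :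
    l.foldl (fun out _ =>
      let step := out.foldl (fun s j => s ++ [!j]) []
      step.foldl (fun o j => o ++ [j]) out) s = g^[l.length] s := by
  induction l generalizing s with
  | nil => simp
  | cons x xs ih =>
      simp only [List.foldl_cons, List.length_cons, ih, Function.iterate_succ_apply]
      congr 1
      rw [foldl_snoc_not, foldl_snoc_id]
      simp [g]

theorem popcnt_pow_add (k : Nat) : ∀ j, j < 2 ^ k → popcnt (2 ^ k + j) = popcnt j + 1 := by
  induction k with
  | zero =>
      intro j hj
      interval_cases j
      simp [popcnt]
  | succ k ih =>
      intro j hj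
      rw [popcnt]
      have h2 : 2 ^ (k + 1) + j ≠ 0 := by positivity
      rw [if_neg h2]
      have hdiv : (2 ^ (k + 1) + j) / 2 = 2 ^ k + j / 2 := by
        omega
      have hmod : (2 ^ (k + 1) + j) % 2 = j % 2 := by
        omega
      rw [hdiv, hmod, ih (j / 2) (by omega)]
      conv_rhs => rw [popcnt]
      rcases Nat.eq_zero_or_pos j with hz | hz
      · subst hz; simp [popcnt]
      · rw [if_neg (by omega)]; ring

theorem parity_flip (p : Nat) : ((p + 1) % 2 == 0) = !(p % 2 == 0) := by
  rcases Nat.mod_two_eq_zero_or_one p with h | h <;> simp [Nat.add_mod, h]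

def tm (k : Nat) : List Bool := (List.range (2 ^ k)).map (fun i => popcnt i % 2 == 0)

theorem tm_succ (k : Nat) : tm (k + 1) = g (tm k) := by
  unfold tm g
  rw [pow_succ, mul_two, List.range_add, List.map_append, List.map_map]
  congr 1
  rw [List.map_map]
  apply List.map_congr_left
  intro j hj
  simp only [List.mem_range] at hj
  simp only [Function.comp_apply]
  rw [popcnt_pow_add k j hj, parity_flip]

theorem iterate_g_true (k : Nat) : g^[k] [true] = tm k := by
  induction k with
  | zero =>
      rw [Function.iterate_zero_apply]
      have h0 : popcnt 0 = 0 := by rw [popcnt]; rfl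
      simp [tm, h0]
  | succ k ih => rw [Function.iterate_succ_apply', ih, tm_succ]

theorem thueMorse_spec : Claim_equal_thueMorse := by
  intro n _
  unfold Spec_thueMorse thueMorse thueMorse_alt
  simp only []
  rw [foldl_body_eq_iterate, PySem.List.length_pyRange_one, iterate_g_true]
  have : (2 * n + 1 - 0).toNat = (max 0 (2 * n + 1)).toNat := by omega
  rw [this]
  rfl
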